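-- pv_equiv track=rewrite | github.com/pypi-data/pypi-mirror-258 | packages/ytvs/ytvs-0.0.28.tar.gz/ytvs-0.0.28/ytvs/extractor/__init__.py | _extract_thumbnail_renderer
-- ===== SOURCE A (Python) =====
-- def _extract_thumbnail_renderer(renderer):
--     if renderer is None:
--         return None
--     thumbnail_urls = {}
--     for idx, banner_url in enumerate(renderer):
--         if idx == 0:
--             thumbnail_urls['default'] = banner_url
--         elif idx == 1:
--             thumbnail_urls['medium'] = banner_url
--         elif idx == 2:
--             thumbnail_urls['high'] = banner_url
--     return thumbnail_urls
-- ===== SOURCE B (Python) =====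
-- def _extract_thumbnail_renderer(renderer):
--     if renderer is None:
--         return None
--
--     def pair(keys, vals):
--         # structural recursion over both lists at once, building the
--         # pairs front-to-back until either list runs out
--         if not keys or not vals:
--             return []
--         return [(keys[0], vals[0])] + pair(keys[1:], vals[1:])
--
--     return dict(pair(['default', 'medium', 'high'], list(renderer)))
-- ===== Notes on version B (the rewrite author's own statement) =====
-- stated objective: alternative
-- what changed: Replaces A's iterative enumerate loop with index-dispatching if/elif branches by a structural recursion that pairs a fixed key list with the value list element by element, building the association front-to-back.
import Mathlib
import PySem

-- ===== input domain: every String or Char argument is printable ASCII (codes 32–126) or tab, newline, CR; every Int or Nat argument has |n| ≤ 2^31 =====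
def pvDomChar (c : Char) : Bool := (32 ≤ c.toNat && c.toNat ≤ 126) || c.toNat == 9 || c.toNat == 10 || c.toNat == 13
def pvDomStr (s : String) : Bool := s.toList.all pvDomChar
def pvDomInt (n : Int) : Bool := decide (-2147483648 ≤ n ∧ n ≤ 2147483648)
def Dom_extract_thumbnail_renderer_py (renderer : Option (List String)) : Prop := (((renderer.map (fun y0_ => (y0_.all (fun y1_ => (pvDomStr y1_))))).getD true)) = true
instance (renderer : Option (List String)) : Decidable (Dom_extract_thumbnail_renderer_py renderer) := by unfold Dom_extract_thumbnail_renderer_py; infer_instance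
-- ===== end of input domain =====

-- B replaces A's enumerate loop with index branches by a structural recursion
-- pairing a fixed key list with the values (objective: alternative decomposition).

-- ===== PORT A =====
-- A: loop over enumerate(renderer), inserting into a dict at indices 0/1/2.
def extract_thumbnail_renderer_py (renderer : Option (List String)) : Option (List (String × String)) :=
  match renderer with
  | none => none
  | some xs =>
    let d := (PySem.List.enumerate xs 0).foldl (fun d p =>
      if p.1 == 0 then d.insert "default" p.2
      else if p.1 == 1 then d.insert "medium" p.2
      else if p.1 == 2 then d.insert "high" p.2
      else d) PySem.Dict.empty
    some d.items

-- ===== PORT B =====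
-- B's helper: structural recursion pairing keys with values until one runs out.
def pvPair : List String → List String → List (String × String)
  | [], _ => []
  | _, [] => []
  | k :: ks, v :: vs => (k, v) :: pvPair ks vs

-- B: dict(pair(['default','medium','high'], items)); keys are distinct, so the
-- dict is exactly the pair list in order.
def extract_thumbnail_renderer_py_alt (renderer : Option (List String)) : Option (List (String × String)) :=
  match renderer with
  | none => none
  | some xs => some (pvPair ["default", "medium", "high"] xs)

-- ===== PRECONDITION & SPEC =====
def Spec_extract_thumbnail_renderer_py (renderer : Option (List String)) (out : Option (List (String × String))) : Prop := out = extract_thumbnail_renderer_py_alt renderer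
instance (renderer : Option (List String)) (out : Option (List (String × String))) : Decidable (Spec_extract_thumbnail_renderer_py renderer out) := by unfold Spec_extract_thumbnail_renderer_py; infer_instance

-- ===== CLAIM (what is proved, stated in full; the proofs are below) =====
def Claim_equal_extract_thumbnail_renderer_py : Prop := ∀ (renderer : Option (List String)), Dom_extract_thumbnail_renderer_py renderer → Spec_extract_thumbnail_renderer_py renderer (extract_thumbnail_renderer_py renderer)

-- ===== LEMMAS AND PROOFS =====
-- past index 2 the loop body of A is the identity
theorem pv_tail_id (rest : List String) (s : Int) (hs : 3 ≤ s) (d : PySem.Dict String String) :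
    (PySem.List.enumerate rest s).foldl (fun d p =>
      if p.1 == 0 then d.insert "default" p.2
      else if p.1 == 1 then d.insert "medium" p.2
      else if p.1 == 2 then d.insert "high" p.2
      else d) d = d := by
  induction rest generalizing s d with
  | nil => simp [PySem.List.enumerate_nil]
  | cons x xs ih =>
    rw [PySem.List.enumerate_cons, List.foldl_cons]
    have h0 : (s == (0:Int)) = false := by simp; omega
    have h1 : (s == (1:Int)) = false := by simp; omega
    have h2 : (s == (2:Int)) = false := by simp; omega
    simp only [h0, h1, h2]
    exact ih (s+1) (by omega) d

-- ===== VERDICT (by name: the statement is the Claim_ definition above) =====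
theorem extract_thumbnail_renderer_py_spec : Claim_equal_extract_thumbnail_renderer_py := by
  intro renderer _
  show extract_thumbnail_renderer_py renderer = extract_thumbnail_renderer_py_alt renderer
  match renderer with
  | none => rfl
  | some [] => rfl
  | some [a] => rfl
  | some [a, b] => rfl
  | some (a :: b :: c :: rest) =>
    simp only [extract_thumbnail_renderer_py, extract_thumbnail_renderer_py_alt]
    rw [PySem.List.enumerate_cons, PySem.List.enumerate_cons, PySem.List.enumerate_cons]
    simp only [List.foldl_cons]
    rw [pv_tail_id rest (0+1+1+1) (by omega)]
    rfl
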